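-- pv_equiv track=rewrite | github.com/gethinyan/algorithm | lintcode/1-100/21-40/39.py | recoverRotatedSortedArray2
-- ===== SOURCE A (Python) =====
-- def recoverRotatedSortedArray2(nums):
--     # write your code here
--     if nums is None:
--         return
--     numsLen = len(nums)
--     index = 0
--     result = []
--     for i in range(numsLen - 1):
--         if nums[i] > nums[i + 1]:
--             index = i + 1
--             break
--     if index == 0:
--         return nums
--     for j in range(numsLen):
--         if j + index < numsLen:
--             result.append(nums[j + index])
--         else:
--             result.append(nums[j + index - numsLen])
--
--     return result
-- ===== SOURCE B (Python) =====
-- def recoverRotatedSortedArray2(nums):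
--     # Same result as A, but the rotation is produced by the three-reversal
--     # idiom on slices instead of the modular-index copy loop; the pivot is
--     # found by a pairwise zip scan instead of an index loop.
--     if nums is None:
--         return None
--     index = 0
--     i = 1
--     for x, y in zip(nums, nums[1:]):
--         if x > y:
--             index = i
--             break
--         i += 1
--     if index == 0:
--         return nums
--     return (nums[:index][::-1] + nums[index:][::-1])[::-1]
-- ===== Notes on version B (the rewrite author's own statement) =====
-- stated objective: alternative
-- what changed: The pivot is found by a pairwise zip scan and the rotation is built by the three-reversal slice idiom (reverse each half, reverse the concatenation) instead of A's modular-index copy loop.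
import Mathlib
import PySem

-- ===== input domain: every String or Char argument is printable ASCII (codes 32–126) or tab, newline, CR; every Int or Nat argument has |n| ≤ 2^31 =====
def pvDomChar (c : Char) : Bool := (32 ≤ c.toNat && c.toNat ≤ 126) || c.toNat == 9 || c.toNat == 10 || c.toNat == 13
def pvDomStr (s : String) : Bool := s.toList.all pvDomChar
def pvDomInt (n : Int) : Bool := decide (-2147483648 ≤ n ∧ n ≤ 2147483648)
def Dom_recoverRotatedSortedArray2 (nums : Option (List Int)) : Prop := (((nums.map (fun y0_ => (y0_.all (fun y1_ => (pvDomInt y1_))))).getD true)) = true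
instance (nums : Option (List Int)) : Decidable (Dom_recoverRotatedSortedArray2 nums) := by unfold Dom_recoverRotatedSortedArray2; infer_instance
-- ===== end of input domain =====

-- B differs from A only in structure: pairwise pivot scan + three-reversal rotation
-- instead of an index pivot loop + modular-index copy loop; same return value everywhere.

-- ===== PORT A =====
-- first loop of A: scan i = 0,1,… ; return i+1 at the first descent, else 0 (break / loop end).
-- fuel (= ns.length at the call) only makes the recursion structural; it never runs out.
def pvA_scan (ns : List Int) : Nat → Nat → Nat
  | 0, _ => 0
  | fuel + 1, i =>
    if h : i + 1 < ns.length then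
      if ns[i] > ns[i + 1] then i + 1 else pvA_scan ns fuel (i + 1)
    else 0

def recoverRotatedSortedArray2 (nums : Option (List Int)) : Option (List Int) :=
  match nums with
  | none => none
  | some ns =>
    let numsLen : Int := ns.length
    let index : Int := pvA_scan ns ns.length 0
    if index = 0 then some ns
    else
      -- second loop of A: result.append(nums[j+index]) / nums[j+index-numsLen]
      some ((PySem.List.pyRange 0 numsLen 1).foldl (fun result j =>
        if j + index < numsLen then result ++ [PySem.List.pyGetD ns (j + index) 0]
        else result ++ [PySem.List.pyGetD ns (j + index - numsLen) 0]) [])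

-- ===== PORT B =====
-- pivot via zip(nums, nums[1:]): i counts from 1, return i at the first descent, else 0
def pvB_scan : List Int → Nat → Nat
  | x :: y :: rest, i => if x > y then i else pvB_scan (y :: rest) (i + 1)
  | _, _ => 0

def recoverRotatedSortedArray2_alt (nums : Option (List Int)) : Option (List Int) :=
  match nums with
  | none => none
  | some ns =>
    let index := pvB_scan ns 1
    if index = 0 then some ns
    else some (((ns.take index).reverse ++ (ns.drop index).reverse).reverse)

-- ===== PRECONDITION & SPEC =====
def Spec_recoverRotatedSortedArray2 (nums : Option (List Int)) (out : Option (List Int)) : Prop := out = recoverRotatedSortedArray2_alt nums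
instance (nums : Option (List Int)) (out : Option (List Int)) : Decidable (Spec_recoverRotatedSortedArray2 nums out) := by unfold Spec_recoverRotatedSortedArray2; infer_instance

-- ===== CLAIM (what is proved, stated in full; the proofs are below) =====
def Claim_equal_recoverRotatedSortedArray2 : Prop := ∀ (nums : Option (List Int)), Dom_recoverRotatedSortedArray2 nums → Spec_recoverRotatedSortedArray2 nums (recoverRotatedSortedArray2 nums)

-- ===== LEMMAS AND PROOFS =====

-- the two pivot scans agree
lemma pv_scan_eq (ns : List Int) : ∀ fuel i, ns.length ≤ fuel + i →
    pvA_scan ns fuel i = pvB_scan (ns.drop i) (i + 1) := by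
  intro fuel
  induction fuel with
  | zero =>
    intro i hi
    have : ns.drop i = [] := List.drop_eq_nil_of_le (by omega)
    simp [pvA_scan, this, pvB_scan]
  | succ fuel IH =>
    intro i hi
    rw [pvA_scan]
    by_cases h : i + 1 < ns.length
    · rw [List.drop_eq_getElem_cons (l := ns) (by omega : i < ns.length),
          List.drop_eq_getElem_cons (l := ns) (by omega : i + 1 < ns.length)]
      simp only [h, dif_pos, pvB_scan]
      by_cases hc : ns[i] > ns[i + 1]
      · simp [hc]
      · rw [if_neg hc, if_neg hc]
        rw [IH (i + 1) (by omega),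
            List.drop_eq_getElem_cons (l := ns) (by omega : i + 1 < ns.length)]
    · simp only [h, dif_neg, not_false_iff]
      rcases hd : ns.drop i with _ | ⟨x, t⟩
      · simp [pvB_scan]
      · rcases t with _ | ⟨y, t'⟩
        · simp [pvB_scan]
        · exfalso
          have := congrArg List.length hd
          simp [List.length_drop] at this
          omega

-- pvA_scan returns 0 or a valid pivot index
lemma pvA_scan_lt (ns : List Int) : ∀ fuel i,
    pvA_scan ns fuel i = 0 ∨ (0 < pvA_scan ns fuel i ∧ pvA_scan ns fuel i < ns.length) := by
  intro fuel
  induction fuel with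
  | zero => intro i; simp [pvA_scan]
  | succ fuel IH =>
    intro i
    rw [pvA_scan]
    by_cases h : i + 1 < ns.length
    · by_cases hc : ns[i] > ns[i + 1]
      · rw [dif_pos h, if_pos hc]
        right; omega
      · rw [dif_pos h, if_neg hc]
        exact IH (i + 1)
    · simp [h]

-- A's copy loop with pivot k produces the rotation drop k ++ take k
lemma pv_rot_eq (ns : List Int) (k : Nat) (hk : k < ns.length) :
    (PySem.List.pyRange 0 (ns.length : Int) 1).foldl (fun result j =>
        if j + (k : Int) < (ns.length : Int) then result ++ [PySem.List.pyGetD ns (j + (k : Int)) 0]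
        else result ++ [PySem.List.pyGetD ns (j + (k : Int) - (ns.length : Int)) 0]) []
      = ns.drop k ++ ns.take k := by
  have hsplit : (fun (result : List Int) (j : Int) =>
      if j + (k : Int) < (ns.length : Int) then result ++ [PySem.List.pyGetD ns (j + (k : Int)) 0]
      else result ++ [PySem.List.pyGetD ns (j + (k : Int) - (ns.length : Int)) 0])
      = fun result j => result ++ [if j + (k : Int) < (ns.length : Int) then PySem.List.pyGetD ns (j + (k : Int)) 0
          else PySem.List.pyGetD ns (j + (k : Int) - (ns.length : Int)) 0] := by
    funext result j; split_ifs <;> rfl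
  rw [hsplit, PySem.List.foldl_append_singleton_eq_map, PySem.List.pyRange_one]
  simp only [sub_zero, Int.toNat_natCast, List.map_map, List.nil_append, zero_add]
  apply List.ext_getElem
  · simp; omega
  · intro j hj1 hj2
    simp only [List.getElem_map, List.getElem_range, Function.comp_apply]
    have hjn : j < ns.length := by simpa using hj1
    by_cases hcase : j + k < ns.length
    · rw [if_pos (by exact_mod_cast hcase)]
      have : ((j : Int) + (k : Int)) = ((j + k : Nat) : Int) := by push_cast; ring
      rw [this, PySem.List.pyGetD_natCast, List.getD_eq_getElem _ _ hcase,
          List.getElem_append_left (by simp [List.length_drop]; omega)]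
      simp [List.getElem_drop]; congr 1; omega
    · rw [if_neg (by omega)]
      have : ((j : Int) + (k : Int) - (ns.length : Int)) = ((j + k - ns.length : Nat) : Int) := by
        rw [Nat.cast_sub (by omega : ns.length ≤ j + k)]; push_cast; ring
      rw [this, PySem.List.pyGetD_natCast, List.getD_eq_getElem _ _ (by omega),
          List.getElem_append_right (by simp [List.length_drop]; omega)]
      simp [List.getElem_take, List.length_drop]
      congr 1; omega

-- ===== VERDICT (by name: the statement is the Claim_ definition above) =====
theorem recoverRotatedSortedArray2_spec : Claim_equal_recoverRotatedSortedArray2 := by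
  intro nums _
  unfold Spec_recoverRotatedSortedArray2 recoverRotatedSortedArray2 recoverRotatedSortedArray2_alt
  match nums with
  | none => rfl
  | some ns =>
    simp only
    have hscan : pvA_scan ns ns.length 0 = pvB_scan ns 1 := by
      simpa using pv_scan_eq ns ns.length 0 (by omega)
    rw [hscan]
    by_cases h0 : pvB_scan ns 1 = 0
    · simp [h0]
    · have hlt : 0 < pvB_scan ns 1 ∧ pvB_scan ns 1 < ns.length := by
        rcases pvA_scan_lt ns ns.length 0 with h | h
        · exact absurd (hscan ▸ h) h0
        · exact ⟨hscan ▸ h.1, hscan ▸ h.2⟩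
      rw [if_neg (by exact_mod_cast h0), if_neg h0]
      congr 1
      rw [pv_rot_eq ns (pvB_scan ns 1) hlt.2]
      simp
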